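-- pv_equiv track=rewrite | github.com/romeorizzi/TALight | example_problems/tutorial/increasing_subseq/bots/python/longest_increasing_exponential_mybot.py | find_ls
-- ===== SOURCE A (Python) =====
-- def find_ls(l):
--     lung = 0
--     index = []
--     ret = []
--     for i in l:
--         if len(i) > lung:
--             index.clear()
--             lung = len(i)
--             index.append(l.index(i))
--         elif len(i) == lung:
--             index.append(l.index(i))
--     for i in index:
--         if (l[i] not in ret):
--             ret.append(l[i])
--     return ret, lung
-- ===== SOURCE B (Python) =====
-- def find_ls(l):
--     lung = max((len(i) for i in l), default=0)
--     ret = []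
--     for i in l:
--         if len(i) == lung and i not in ret:
--             ret.append(i)
--     return ret, lung
-- ===== Notes on version B (the rewrite author's own statement) =====
-- stated objective: faster
-- what changed: B computes the maximum length in one pass and then collects distinct max-length elements in a second filtering pass, removing A's repeated l.index scans and its index-list-with-clear bookkeeping and dereferencing loop.
import Mathlib
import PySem

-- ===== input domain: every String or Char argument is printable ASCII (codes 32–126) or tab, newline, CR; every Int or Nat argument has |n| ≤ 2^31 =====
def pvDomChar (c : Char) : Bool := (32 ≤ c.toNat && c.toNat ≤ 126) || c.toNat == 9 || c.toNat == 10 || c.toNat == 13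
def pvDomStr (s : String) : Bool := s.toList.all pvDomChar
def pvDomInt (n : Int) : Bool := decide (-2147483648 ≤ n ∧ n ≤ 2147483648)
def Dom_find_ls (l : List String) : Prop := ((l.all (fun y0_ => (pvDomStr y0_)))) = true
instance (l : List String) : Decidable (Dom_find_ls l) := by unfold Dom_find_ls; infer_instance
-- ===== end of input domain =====

-- B replaces A's running-max + index-list bookkeeping (with its O(n) l.index scan per element)
-- by two plain passes: max of lengths, then filter-dedup; measured faster. A is total; no Pre_ needed.

-- ===== PORT A =====
-- first loop of A: state (lung, index); l.index(i) always succeeds since i ∈ l, ported as (index? …).getD 0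
def find_ls (l : List String) : List String × Int :=
  let st := l.foldl
    (fun (st : Int × List Int) i =>
      if PySem.Str.len i > st.1 then
        (PySem.Str.len i, [(((PySem.List.index? l i).getD 0 : Nat) : Int)])
      else if PySem.Str.len i == st.1 then
        (st.1, st.2 ++ [(((PySem.List.index? l i).getD 0 : Nat) : Int)])
      else st)
    (0, [])
  let ret := st.2.foldl
    (fun ret j =>
      if !(ret.contains (PySem.List.pyGetD l j "")) then ret ++ [PySem.List.pyGetD l j ""]
      else ret)
    []
  (ret, st.1)

-- ===== PORT B =====
def find_ls_alt (l : List String) : List String × Int :=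
  let lung := (PySem.List.max? (l.map (fun i => PySem.Str.len i)) (fun x => x)).getD 0
  let ret := l.foldl
    (fun ret i =>
      if PySem.Str.len i == lung && !(ret.contains i) then ret ++ [i] else ret)
    []
  (ret, lung)

-- ===== PRECONDITION & SPEC =====
def Spec_find_ls (l : List String) (out : List String × Int) : Prop := out = find_ls_alt l
instance (l : List String) (out : List String × Int) : Decidable (Spec_find_ls l out) := by unfold Spec_find_ls; infer_instance

-- ===== CLAIM (what is proved, stated in full; the proofs are below) =====
def Claim_equal_find_ls : Prop := ∀ (l : List String), Dom_find_ls l → Spec_find_ls l (find_ls l)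

-- ===== LEMMAS AND PROOFS =====

def pvStep (g : String → Int) (st : Int × List String) (i : String) : Int × List String :=
  if g i > st.1 then (g i, [i])
  else if g i == st.1 then (st.1, st.2 ++ [i])
  else st

def pvMaxLen (g : String → Int) (s : List String) (c : Int) : Int :=
  s.foldl (fun a i => max a (g i)) c

theorem pv_le_maxLen (g : String → Int) (s : List String) (c : Int) : c ≤ pvMaxLen g s c := by
  induction s generalizing c with
  | nil => exact le_refl c
  | cons i t ih => exact le_trans (le_max_left _ _) (ih (max c (g i)))

theorem pv_maxLen_cons (g : String → Int) (i : String) (t : List String) (c : Int) :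
    pvMaxLen g (i :: t) c = pvMaxLen g t (max c (g i)) := rfl

theorem pv_maxLen_of_all_le (g : String → Int) (s : List String) (c : Int)
    (h : ∀ i ∈ s, g i ≤ c) : pvMaxLen g s c = c := by
  induction s generalizing c with
  | nil => rfl
  | cons i t ih =>
    rw [pv_maxLen_cons, max_eq_left (h i List.mem_cons_self)]
    exact ih c (fun x hx => h x (List.mem_cons_of_mem _ hx))

theorem pv_mem_le_maxLen (g : String → Int) (s : List String) (c : Int)
    (i : String) (hi : i ∈ s) : g i ≤ pvMaxLen g s c := by
  induction s generalizing c with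
  | nil => simp at hi
  | cons j t ih =>
    rcases List.mem_cons.1 hi with h | h
    · subst h; exact le_trans (le_max_right _ _) (pv_le_maxLen g t _)
    · exact ih _ h

theorem pv_any_gt_iff (g : String → Int) (s : List String) (c : Int) :
    s.any (fun i => decide (g i > c)) = true ↔ c < pvMaxLen g s c := by
  constructor
  · intro h
    obtain ⟨i, hi, hgt⟩ := List.any_eq_true.1 h
    have := pv_mem_le_maxLen g s c i hi
    have hgt : c < g i := of_decide_eq_true hgt
    omega
  · intro h
    by_contra hno
    have : ∀ i ∈ s, g i ≤ c := by
      intro i hi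
      by_contra hgt
      exact hno (List.any_eq_true.2 ⟨i, hi, decide_eq_true (by omega)⟩)
    rw [pv_maxLen_of_all_le g s c this] at h
    omega

theorem pv_maxLen_of_not_any (g : String → Int) (s : List String) (c : Int)
    (h : s.any (fun i => decide (g i > c)) = false) : pvMaxLen g s c = c := by
  have h2 := (pv_any_gt_iff g s c).not
  have h3 := pv_le_maxLen g s c
  rw [h] at h2
  simp at h2
  omega

theorem pv_loopS_spec (g : String → Int) (s : List String) (c : Int) (acc : List String) :
    s.foldl (pvStep g) (c, acc) =
      (pvMaxLen g s c,
       (if s.any (fun i => decide (g i > c)) then [] else acc) ++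
         s.filter (fun i => g i == pvMaxLen g s c)) := by
  induction s generalizing c acc with
  | nil => simp [pvMaxLen]
  | cons i t ih =>
    rw [List.foldl_cons, pv_maxLen_cons, List.any_cons, List.filter_cons]
    rcases lt_trichotomy c (g i) with h | h | h
    · -- strictly larger: clear
      rw [show pvStep g (c, acc) i = (g i, [i]) by simp [pvStep, h], ih,
        max_eq_right (le_of_lt h), decide_eq_true h, Bool.true_or, if_pos rfl]
      by_cases ht : t.any (fun j => decide (g j > g i)) = true
      · have hm : g i < pvMaxLen g t (g i) := (pv_any_gt_iff g t (g i)).1 ht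
        rw [if_pos ht, if_neg (by simp; omega)]
      · have hm : pvMaxLen g t (g i) = g i :=
          pv_maxLen_of_not_any g t (g i) (Bool.not_eq_true _ ▸ ht)
        rw [if_neg (by simp [ht]), if_pos (by simp [hm])]
        simp
    · -- equal: append
      rw [show pvStep g (c, acc) i = (c, acc ++ [i]) by simp [pvStep, h], ih,
        max_eq_left (le_of_eq h.symm), decide_eq_false (by omega), Bool.false_or]
      by_cases ht : t.any (fun j => decide (g j > c)) = true
      · have hm : c < pvMaxLen g t c := (pv_any_gt_iff g t c).1 ht
        rw [if_pos ht, if_pos ht, if_neg (by simp; omega)]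
      · have hm : pvMaxLen g t c = c :=
          pv_maxLen_of_not_any g t c (Bool.not_eq_true _ ▸ ht)
        rw [if_neg (by simp [ht]), if_neg (by simp [ht]), if_pos (by simp [hm, ← h])]
        simp
    · -- strictly smaller: skip
      have hstep : pvStep g (c, acc) i = (c, acc) := by
        unfold pvStep
        rw [if_neg (by omega), if_neg (by simp; omega)]
      rw [hstep, ih, max_eq_left (le_of_lt h), decide_eq_false (by omega), Bool.false_or]
      have hm := pv_le_maxLen g t c
      have hne : (g i == pvMaxLen g t c) = false := by simp; omega
      rw [hne]
      simp

theorem pv_fused_eq_dedup (g : String → Int) (s : List String) (lung : Int) (acc : List String) :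
    s.foldl (fun ret i =>
      if g i == lung && !(ret.contains i) then ret ++ [i] else ret) acc
    = (s.filter (fun i => g i == lung)).foldl
        (fun ret i => if !(ret.contains i) then ret ++ [i] else ret) acc := by
  induction s generalizing acc with
  | nil => rfl
  | cons i t ih =>
    rw [List.foldl_cons, List.filter_cons]
    by_cases hg : (g i == lung) = true
    · rw [hg, Bool.true_and, if_pos rfl, List.foldl_cons]
      exact ih _
    · rw [Bool.not_eq_true] at hg
      rw [hg, Bool.false_and, if_neg (by simp), if_neg (by simp)]
      exact ih _

theorem pv_lung_eq (g : String → Int) (l : List String) (hg : ∀ i ∈ l, 0 ≤ g i) :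
    (PySem.List.max? (l.map g) (fun x => x)).getD 0 = pvMaxLen g l 0 := by
  cases l with
  | nil => rfl
  | cons x t =>
    rw [List.map_cons, PySem.List.max?_id_cons, Option.getD_some, List.foldl_map,
      pv_maxLen_cons, max_eq_right (hg x List.mem_cons_self)]
    rfl

-- dereferencing the stored first-occurrence index gives back the element
theorem pv_deref (l : List String) (i : String) (h : i ∈ l) :
    PySem.List.pyGetD l (((PySem.List.index? l i).getD 0 : Nat) : Int) "" = i := by
  obtain ⟨k, hk⟩ := (PySem.List.index?_isSome_iff (xs := l) (v := i)).2 h |> Option.isSome_iff_exists.mp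
  obtain ⟨hlt, hget, -⟩ := PySem.List.getElem_of_index?_eq_some hk
  rw [hk]
  simp [PySem.List.pyGetD_natCast, List.getD, hlt, hget]

-- A's first loop equals the element-carrying loop: same max, indices deref to the elements
theorem pv_loopA_eq_loopS (l s : List String) (hs : ∀ i ∈ s, i ∈ l) (c : Int)
    (idx : List Int) (acc : List String)
    (hinv : idx.map (fun j => PySem.List.pyGetD l j "") = acc) :
    (s.foldl (fun (st : Int × List Int) i =>
      if PySem.Str.len i > st.1 then
        (PySem.Str.len i, [(((PySem.List.index? l i).getD 0 : Nat) : Int)])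
      else if PySem.Str.len i == st.1 then
        (st.1, st.2 ++ [(((PySem.List.index? l i).getD 0 : Nat) : Int)])
      else st) (c, idx)).1 = (s.foldl (pvStep PySem.Str.len) (c, acc)).1 ∧
    (s.foldl (fun (st : Int × List Int) i =>
      if PySem.Str.len i > st.1 then
        (PySem.Str.len i, [(((PySem.List.index? l i).getD 0 : Nat) : Int)])
      else if PySem.Str.len i == st.1 then
        (st.1, st.2 ++ [(((PySem.List.index? l i).getD 0 : Nat) : Int)])
      else st) (c, idx)).2.map (fun j => PySem.List.pyGetD l j "")
      = (s.foldl (pvStep PySem.Str.len) (c, acc)).2 := by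
  induction s generalizing c idx acc with
  | nil => exact ⟨rfl, hinv⟩
  | cons i t ih =>
    have hi : i ∈ l := hs i (List.mem_cons_self)
    have ht : ∀ x ∈ t, x ∈ l := fun x hx => hs x (List.mem_cons_of_mem _ hx)
    simp only [List.foldl_cons, pvStep]
    split_ifs with h1 h2
    · exact ih ht _ _ _ (by simp only [List.map_cons, List.map_nil, pv_deref l i hi])
    · exact ih ht _ _ _ (by simp only [List.map_append, List.map_cons, List.map_nil, hinv, pv_deref l i hi])
    · exact ih ht _ _ _ hinv

-- ===== VERDICT (by name: the statement is the Claim_ definition above) =====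

theorem find_ls_spec : Claim_equal_find_ls := by
  intro l _
  have hlen : ∀ i ∈ l, (0 : Int) ≤ PySem.Str.len i := by
    intro i _
    simp [PySem.Str.len_eq]
  obtain ⟨h1, h2⟩ := pv_loopA_eq_loopS l l (fun _ h => h) 0 [] [] rfl
  rw [pv_loopS_spec] at h1 h2
  simp only [List.nil_append, ite_self] at h1 h2
  simp only [Spec_find_ls, find_ls, find_ls_alt]
  rw [pv_lung_eq PySem.Str.len l hlen, pv_fused_eq_dedup, h1, ← h2, List.foldl_map]
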